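-- pv_equiv track=rewrite | github.com/troxlepa/s_tagebuech | connectors.py | get_uni
-- ===== SOURCE A (Python) =====
-- def get_uni(arr):
--     num = -1
--     cnt = 0
--     last = -1
--     res = []
--     for i in arr:
--         if num == -1:
--             num = 1
--             cnt = i
--             last = i
--             continue
--         if i <= last + 1:
--             num += 1
--             cnt += i
--             last = i
--         else:
--             res.append(cnt // num)
--             last = i
--             num = 1
--             cnt = i
--     if num != -1: res.append(cnt // num)
--     return res
-- ===== SOURCE B (Python) =====
-- def get_uni(arr):
--     n = len(arr)
--     if n == 0:
--         return []
--     pref = [0]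
--     acc = 0
--     for x in arr:
--         acc += x
--         pref.append(acc)
--     bounds = [0] + [k for k in range(1, n) if arr[k] > arr[k - 1] + 1] + [n]
--     return [(pref[e] - pref[s]) // (e - s) for s, e in zip(bounds, bounds[1:])]
-- ===== Notes on version B (the rewrite author's own statement) =====
-- stated objective: alternative
-- what changed: B replaces A's one-pass running sum/count/last state machine with an index-based two-phase computation: it first locates the run-boundary indices k with arr[k] > arr[k-1]+1, builds a prefix-sum array, and then emits each run's average as a prefix-sum difference divided by the index gap.
import Mathlib
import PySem

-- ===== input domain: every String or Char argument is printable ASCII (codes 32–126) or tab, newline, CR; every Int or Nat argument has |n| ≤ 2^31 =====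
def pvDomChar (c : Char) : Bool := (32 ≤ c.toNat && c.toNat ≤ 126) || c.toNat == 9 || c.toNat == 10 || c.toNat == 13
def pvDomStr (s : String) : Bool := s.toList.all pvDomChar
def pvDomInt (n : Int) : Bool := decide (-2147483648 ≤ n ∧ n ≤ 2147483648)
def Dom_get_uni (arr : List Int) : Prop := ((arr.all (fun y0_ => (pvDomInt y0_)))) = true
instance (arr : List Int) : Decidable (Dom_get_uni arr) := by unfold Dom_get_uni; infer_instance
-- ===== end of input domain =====

-- B computes run-boundary indices and a prefix-sum array, then averages each run as a
-- prefix-sum difference over an index gap, instead of A's running sum/count/last state machine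
-- (objective: alternative; same O(n) cost).

-- ===== PORT A =====
-- state: (num, cnt, last, res) exactly as A maintains them
def get_uni_step (st : Int × Int × Int × List Int) (i : Int) : Int × Int × Int × List Int :=
  let (num, cnt, last, res) := st
  if num = -1 then (1, i, i, res)
  else if i ≤ last + 1 then (num + 1, cnt + i, i, res)
  else (1, i, i, res ++ [PySem.Int.floordiv cnt num])

def get_uni (arr : List Int) : List Int :=
  let st := arr.foldl get_uni_step (-1, 0, -1, [])
  let (num, cnt, _, res) := st
  if num ≠ -1 then res ++ [PySem.Int.floordiv cnt num] else res

-- ===== PORT B =====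
-- the prefix-sum list Source B builds: starts at `acc`, appends the running total after each element
def prefSums (acc : Int) : List Int → List Int
  | [] => [acc]
  | x :: xs => acc :: prefSums (acc + x) xs

def get_uni_alt (arr : List Int) : List Int :=
  let n := arr.length
  if n = 0 then []
  else
    let pref := prefSums 0 arr
    let bounds := (0 :: (List.range' 1 (n - 1)).filter
        (fun k => decide (arr.getD (k - 1) 0 + 1 < arr.getD k 0))) ++ [n]
    (bounds.zip bounds.tail).map
      (fun se => PySem.Int.floordiv (pref.getD se.2 0 - pref.getD se.1 0) ((se.2 : Int) - (se.1 : Int)))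

-- ===== PRECONDITION & SPEC =====
def Spec_get_uni (arr : List Int) (out : List Int) : Prop := out = get_uni_alt arr
instance (arr : List Int) (out : List Int) : Decidable (Spec_get_uni arr out) := by unfold Spec_get_uni; infer_instance

-- ===== CLAIM (what is proved, stated in full; the proofs are below) =====
def Claim_equal_get_uni : Prop := ∀ (arr : List Int), Dom_get_uni arr → Spec_get_uni arr (get_uni arr)

-- ===== LEMMAS AND PROOFS =====

-- A's post-loop finalisation, as a helper for the invariant
def get_uni_fin (st : Int × Int × Int × List Int) : List Int :=
  match st with
  | (num, cnt, _, res) => if num ≠ -1 then res ++ [PySem.Int.floordiv cnt num] else res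

-- the runs of the list, an abstract middle ground between the two ports:
-- `cur` is the current run reversed, `p` the last appended value
def runsGo (rest : List Int) (cur : List Int) (p : Int) : List (List Int) :=
  match rest with
  | [] => [cur.reverse]
  | i :: rs =>
    if i ≤ p + 1 then runsGo rs (i :: cur) i
    else cur.reverse :: runsGo rs [i] i

def avgRun (r : List Int) : Int := PySem.Int.floordiv r.sum r.length

-- A-side invariant: once A's state mirrors the current (nonempty) run, finishing A's loop
-- equals res ++ the averaged runs built from the same point
theorem get_uni_fold_eq (rest : List Int) :
    ∀ (cur : List Int) (last : Int) (res : List Int) (num cnt : Int),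
    num = (cur.length : Int) → cnt = cur.sum →
    get_uni_fin (rest.foldl get_uni_step (num, cnt, last, res))
    = res ++ (runsGo rest cur last).map avgRun := by
  induction rest with
  | nil =>
    intro cur last res num cnt hnum hcnt
    have hlen : ¬ (num = -1) := by omega
    simp [get_uni_fin, runsGo, avgRun, hnum, hcnt]
  | cons i rs ih =>
    intro cur last res num cnt hnum hcnt
    have hlen : ¬ (num = -1) := by omega
    simp only [List.foldl_cons, get_uni_step, hlen, if_false]
    by_cases hle : i ≤ last + 1
    · rw [if_pos hle,
        ih (i :: cur) i res (num + 1) (cnt + i) (by simp [hnum]) (by simp [hcnt, Int.add_comm])]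
      simp [runsGo, hle]
    · rw [if_neg hle,
        ih [i] i (res ++ [PySem.Int.floordiv cnt num]) 1 i (by simp) (by simp)]
      simp [runsGo, avgRun, hle, hnum, hcnt]

-- the run-boundary positions, recursively: p = previous value, s = index of the head of rest
def cutsAux (p : Int) (s : Nat) : List Int → List Nat
  | [] => []
  | x :: xs => if p + 1 < x then s :: cutsAux x (s + 1) xs else cutsAux x (s + 1) xs

-- B's filtered range of boundary indices is cutsAux
theorem filter_eq_cutsAux (rs : List Int) :
    ∀ (arr pre : List Int) (p : Int), arr = pre ++ rs → pre.getLast? = some p →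
    (List.range' pre.length rs.length).filter
        (fun k => decide (arr.getD (k - 1) 0 + 1 < arr.getD k 0))
      = cutsAux p pre.length rs := by
  induction rs with
  | nil => intro arr pre p _ _; simp [cutsAux]
  | cons x xs ih =>
    intro arr pre p harr hlast
    have hpre : pre ≠ [] := by intro h; simp [h] at hlast
    have hpos : 0 < pre.length := List.length_pos_iff.mpr hpre
    have hgetx : arr.getD pre.length 0 = x := by
      subst harr
      simp [List.getD_eq_getElem?_getD]
    have hgetp : arr.getD (pre.length - 1) 0 = p := by
      subst harr
      have hlt : pre.length - 1 < pre.length := by omega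
      rw [List.getD_eq_getElem?_getD, List.getElem?_append_left hlt]
      rw [List.getLast?_eq_getElem?] at hlast
      simpa using congrArg (Option.getD · 0) hlast
    have hrec := ih arr (pre ++ [x]) x (by simp [harr]) (by simp)
    simp only [List.length_append, List.length_cons, List.length_nil, Nat.zero_add] at hrec
    rw [show List.range' pre.length (x :: xs).length
        = pre.length :: List.range' (pre.length + 1) xs.length by
      simp [List.range'_succ]]
    rw [List.filter_cons]
    simp only [hgetx, hgetp, cutsAux]
    by_cases hc : p + 1 < x
    · simp only [hc, decide_true, if_true]
      rw [hrec]
    · simp only [hc, decide_false, Bool.false_eq_true, if_false]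
      exact hrec

-- every boundary index lies strictly below s + |rest|
theorem cutsAux_lt (rs : List Int) :
    ∀ (p : Int) (s : Nat) (k : Nat), k ∈ cutsAux p s rs → k < s + rs.length := by
  induction rs with
  | nil => intro p s k h; simp [cutsAux] at h
  | cons x xs ih =>
    intro p s k h
    simp only [cutsAux] at h
    split at h
    · rcases List.mem_cons.mp h with h | h
      · simp [h]
      · have := ih x (s + 1) k h; simp at this ⊢; omega
    · have := ih x (s + 1) k h; simp at this ⊢; omega

-- the prefix-sum list realises take-sums
theorem prefSums_getD (xs : List Int) :
    ∀ (a : Int) (k : Nat), k ≤ xs.length → (prefSums a xs).getD k 0 = a + (xs.take k).sum := by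
  induction xs with
  | nil =>
    intro a k h
    have hk : k = 0 := Nat.le_zero.mp h
    subst hk; simp [prefSums]
  | cons x xs ih =>
    intro a k h
    cases k with
    | zero => simp [prefSums]
    | succ k =>
      simp only [prefSums, List.getD_cons_succ, List.take_succ_cons, List.sum_cons]
      rw [ih (a + x) k (by simpa using h)]
      ring

-- averaging the segments between consecutive bounds, via take-sums
def segAvgs (L : List Int) (bs : List Nat) : List Int :=
  (bs.zip bs.tail).map
    (fun se => PySem.Int.floordiv ((L.take se.2).sum - (L.take se.1).sum) ((se.2 : Int) - (se.1 : Int)))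

theorem segAvgs_cons (L : List Int) (a b : Nat) (rest : List Nat) :
    segAvgs L (a :: b :: rest)
    = PySem.Int.floordiv ((L.take b).sum - (L.take a).sum) ((b : Int) - (a : Int))
      :: segAvgs L (b :: rest) := by
  simp [segAvgs]

-- key lemma: segment averages at the cut bounds equal the averaged runs
theorem segAvgs_eq_runs (rs : List Int) :
    ∀ (A0 cur : List Int) (p : Int) (arr : List Int),
    arr = A0 ++ cur.reverse ++ rs → cur.head? = some p →
    segAvgs arr (A0.length :: (cutsAux p (A0.length + cur.length) rs ++ [arr.length]))
    = (runsGo rs cur p).map avgRun := by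
  induction rs with
  | nil =>
    intro A0 cur p arr harr hhead
    have hcur : cur ≠ [] := by intro h; simp [h] at hhead
    have hcpos : 0 < cur.length := List.length_pos_iff.mpr hcur
    have htakeA : arr.take A0.length = A0 := by
      subst harr; simp only [List.append_nil]; exact List.take_left
    have htakeN : arr.take arr.length = arr := List.take_length
    have hsum : arr.sum - A0.sum = cur.sum := by simp [harr]
    have hint : (arr.length : Int) - (A0.length : Int) = (cur.length : Int) := by
      have : arr.length = A0.length + cur.length := by simp [harr]
      rw [this]; push_cast; ring
    rw [show cutsAux p (A0.length + cur.length) ([] : List Int) = [] from rfl,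
        List.nil_append, segAvgs_cons, htakeA, htakeN, hsum, hint,
        show segAvgs arr [arr.length] = [] from rfl]
    simp [runsGo, avgRun]
  | cons x xs ih =>
    intro A0 cur p arr harr hhead
    have hcur : cur ≠ [] := by intro h; simp [h] at hhead
    have hcpos : 0 < cur.length := List.length_pos_iff.mpr hcur
    by_cases hle : x ≤ p + 1
    · have hc : ¬ (p + 1 < x) := by omega
      have harr' : arr = A0 ++ (x :: cur).reverse ++ xs := by
        simp [harr, List.reverse_cons]
      have hrec := ih A0 (x :: cur) x arr harr' (by simp)
      simp only [List.length_cons] at hrec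
      rw [show cutsAux p (A0.length + cur.length) (x :: xs)
          = cutsAux x (A0.length + cur.length + 1) xs by simp [cutsAux, hc]]
      rw [show A0.length + cur.length + 1 = A0.length + (cur.length + 1) by omega, hrec]
      simp [runsGo, hle]
    · have hc : p + 1 < x := by omega
      have harr' : arr = (A0 ++ cur.reverse) ++ [x].reverse ++ xs := by
        simp [harr]
      have hrec := ih (A0 ++ cur.reverse) [x] x arr harr' (by simp)
      simp only [List.length_append, List.length_reverse, List.length_cons, List.length_nil,
        Nat.zero_add] at hrec
      have htakeA : arr.take A0.length = A0 := by
        subst harr; simp only [List.append_assoc]; exact List.take_left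
      have htakeS : arr.take (A0.length + cur.length) = A0 ++ cur.reverse := by
        subst harr
        rw [show A0.length + cur.length = (A0 ++ cur.reverse).length by simp]
        exact List.take_left
      have hsum : (A0 ++ cur.reverse).sum - A0.sum = cur.sum := by simp
      have hint : ((A0.length + cur.length : Nat) : Int) - (A0.length : Int) = (cur.length : Int) := by
        push_cast; ring
      rw [show cutsAux p (A0.length + cur.length) (x :: xs)
          = (A0.length + cur.length) :: cutsAux x (A0.length + cur.length + 1) xs by
        simp [cutsAux, hc]]
      rw [List.cons_append, segAvgs_cons, htakeS, htakeA, hsum, hint, hrec]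
      simp [runsGo, avgRun, hle]

-- ===== VERDICT (by name: the statement is the Claim_ definition above) =====
theorem get_uni_spec : Claim_equal_get_uni := by
  intro arr _
  unfold Spec_get_uni
  cases arr with
  | nil => simp [get_uni, get_uni_alt]
  | cons i rs =>
    -- A side: get_uni (i :: rs) = averaged runs
    have hstep : get_uni_step (-1, 0, -1, []) i = (1, i, i, []) := by
      simp [get_uni_step]
    have hA : get_uni (i :: rs) = (runsGo rs [i] i).map avgRun := by
      have h := get_uni_fold_eq rs [i] i [] 1 i (by simp) (by simp)
      simp only [get_uni, List.foldl_cons, hstep]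
      simpa [get_uni_fin] using h
    -- B side: get_uni_alt (i :: rs) = averaged runs
    have hB : get_uni_alt (i :: rs) = (runsGo rs [i] i).map avgRun := by
      set arr := i :: rs with harrdef
      have hn : arr.length = rs.length + 1 := by simp [harrdef]
      have hne : ¬ (arr.length = 0) := by omega
      have hfil := filter_eq_cutsAux rs arr [i] i (by simp [harrdef]) (by simp)
      simp only [List.length_cons, List.length_nil] at hfil
      have hbounds : ((0 : Nat) :: (List.range' 1 (arr.length - 1)).filter
            (fun k => decide (arr.getD (k - 1) 0 + 1 < arr.getD k 0))) ++ [arr.length]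
          = 0 :: (cutsAux i 1 rs ++ [arr.length]) := by
        rw [show arr.length - 1 = rs.length by omega, hfil]
        simp
      -- the bounds all lie within [0, arr.length], so pref.getD is the take-sum
      have hmem : ∀ k ∈ (0 : Nat) :: (cutsAux i 1 rs ++ [arr.length]), k ≤ arr.length := by
        intro k hk
        rcases List.mem_cons.mp hk with h | h
        · omega
        · rcases List.mem_append.mp h with h | h
          · have := cutsAux_lt rs i 1 k h; omega
          · simp at h; omega
      have hmap : ∀ bs : List Nat, (∀ k ∈ bs, k ≤ arr.length) →
          (bs.zip bs.tail).map (fun se => PySem.Int.floordiv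
              ((prefSums 0 arr).getD se.2 0 - (prefSums 0 arr).getD se.1 0)
              ((se.2 : Int) - (se.1 : Int)))
          = segAvgs arr bs := by
        intro bs hbs
        unfold segAvgs
        apply List.map_congr_left
        intro se hse
        have h1 : se.1 ∈ bs := (List.of_mem_zip (a := se.1) (b := se.2) (by simpa using hse)).1
        have h2 : se.2 ∈ bs := List.mem_of_mem_tail
          (List.of_mem_zip (a := se.1) (b := se.2) (by simpa using hse)).2
        rw [prefSums_getD arr 0 se.1 (hbs _ h1), prefSums_getD arr 0 se.2 (hbs _ h2)]
        simp
      have hseg := segAvgs_eq_runs rs [] [i] i arr (by simp [harrdef]) (by simp)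
      simp only [List.length_nil, List.length_cons] at hseg
      show (if arr.length = 0 then [] else _) = _
      rw [if_neg hne]
      simp only [hbounds]
      rw [hmap _ hmem]
      rw [show (0 : Nat) + (0 + 1) = 1 by omega] at hseg
      simpa using hseg
    rw [hA, hB]
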